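-- pv_equiv track=rewrite | github.com/BertBril/vaers_db | csvio.py | parseVaersCSVFileLines
-- ===== SOURCE A (Python) =====
-- VAERS_CSV_FIELD_SEP = ','
--
-- VAERS_CSV_STRING_QUOTE = '"'
--
-- def parseVaersCSVFileLines( lines ):
--
--   wordsets = []
--
--   for line in lines:
--
--     inquotes = False
--     words = []
--     word = ""
--
--     for char in line:
--       if char == VAERS_CSV_STRING_QUOTE:
--         inquotes = not inquotes
--       else:
--         if inquotes or char != VAERS_CSV_FIELD_SEP:
--           word += char
--         elif not inquotes:
--           words.append( word )
--           word = ""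
--
--     words.append( word )
--     wordsets.append( words )
--
--   return wordsets
-- ===== SOURCE B (Python) =====
-- def parseVaersCSVFileLines( lines ):
--     wordsets = []
--     for line in lines:
--         fields = line.split(',')
--         merged = []
--         buf = fields[0]
--         inquotes = fields[0].count('"') % 2 == 1
--         for token in fields[1:]:
--             if inquotes:
--                 buf += ',' + token
--             else:
--                 merged.append(buf)
--                 buf = token
--             if token.count('"') % 2 == 1:
--                 inquotes = not inquotes
--         merged.append(buf)
--         wordsets.append([f.replace('"', '') for f in merged])
--     return wordsets
-- ===== Notes on version B (the rewrite author's own statement) =====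
-- stated objective: alternative
-- what changed: Replaces A's char-by-char quote/comma state machine with split(',') followed by a token-level merge pass (re-joining tokens whose preceding quote parity is odd) and a final replace('"','') strip per field.
import Mathlib
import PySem

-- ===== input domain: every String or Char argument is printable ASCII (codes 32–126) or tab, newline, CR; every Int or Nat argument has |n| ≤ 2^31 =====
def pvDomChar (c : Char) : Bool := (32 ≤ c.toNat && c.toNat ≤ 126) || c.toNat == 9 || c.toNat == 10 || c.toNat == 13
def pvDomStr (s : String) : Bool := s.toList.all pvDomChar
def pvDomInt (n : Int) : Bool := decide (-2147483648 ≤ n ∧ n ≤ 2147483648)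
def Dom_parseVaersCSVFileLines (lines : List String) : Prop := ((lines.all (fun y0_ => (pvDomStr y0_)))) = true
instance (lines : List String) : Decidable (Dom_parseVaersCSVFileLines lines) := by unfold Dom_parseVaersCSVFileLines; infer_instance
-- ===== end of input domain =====

-- B replaces A's char-by-char state machine with split-on-comma, then a merge-and-strip
-- pass over the tokens (alternative decomposition of the same parse).


-- ===== PORT A =====
-- state = (inquotes, words, word); strings handled as List Char (PySem.Chars convention)
def pvStepA (st : Bool × List (List Char) × List Char) (char : Char) : Bool × List (List Char) × List Char :=
  if char = '"' then (!st.1, st.2.1, st.2.2)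
  else if st.1 = true ∨ char ≠ ',' then (st.1, st.2.1, st.2.2 ++ [char])
  else if st.1 = false then (st.1, st.2.1 ++ [st.2.2], ([] : List Char))
  else st

def parseVaersCSVFileLines (lines : List String) : List (List String) :=
  lines.map (fun line =>
    let r := line.toList.foldl pvStepA (false, [], [])
    (r.2.1 ++ [r.2.2]).map String.ofList)

-- ===== PORT B =====
-- state = (merged, buf, inquotes); one step of the token loop of Source B
def pvStepB (p : List (List Char) × List Char × Bool) (token : List Char) :
    List (List Char) × List Char × Bool :=
  let p' := if p.2.2 then (p.1, p.2.1 ++ ',' :: token, p.2.2)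
            else (p.1 ++ [p.2.1], token, p.2.2)
  if PySem.Chars.count token ['"'] % 2 == 1 then (p'.1, p'.2.1, !p'.2.2) else p'

def parseVaersCSVFileLines_alt (lines : List String) : List (List String) :=
  lines.map (fun line =>
    let fields := PySem.Chars.splitOn line.toList [',']
    -- fields[0]: str.split always returns a non-empty list, so headD is exact here
    let f0 := fields.headD []
    -- fields[1:] on a list is drop 1 (exact)
    let st := (fields.drop 1).foldl pvStepB
      ([], f0, PySem.Chars.count f0 ['"'] % 2 == 1)
    (st.1 ++ [st.2.1]).map (fun f => String.ofList (PySem.Chars.replace f ['"'] [])))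

-- ===== PRECONDITION & SPEC =====
def Spec_parseVaersCSVFileLines (lines : List String) (out : List (List String)) : Prop := out = parseVaersCSVFileLines_alt lines
instance (lines : List String) (out : List (List String)) : Decidable (Spec_parseVaersCSVFileLines lines out) := by unfold Spec_parseVaersCSVFileLines; infer_instance

-- ===== CLAIM (what is proved, stated in full; the proofs are below) =====
def Claim_equal_parseVaersCSVFileLines : Prop := ∀ (lines : List String), Dom_parseVaersCSVFileLines lines → Spec_parseVaersCSVFileLines lines (parseVaersCSVFileLines lines)

-- ===== LEMMAS AND PROOFS =====

-- remove all quote characters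
def stripq (l : List Char) : List Char := l.filter (fun c => c != '"')

-- quote parity of a token
def parq (l : List Char) : Bool := l.count '"' % 2 == 1

-- reference split at every comma
def splitc : List Char → List (List Char)
  | [] => [[]]
  | a :: s =>
    if a = ',' then [] :: splitc s
    else match splitc s with
      | [] => [[a]]
      | h :: t => (a :: h) :: t

-- prepend w to the first piece
def consHead (w : List Char) : List (List Char) → List (List Char)
  | [] => [w]
  | h :: t => (w ++ h) :: t

-- the merged-and-stripped fields produced from q, current (stripped) buffer w and remaining tokens
def mer2 (q : Bool) (w : List Char) : List (List Char) → List (List Char)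
  | [] => [w]
  | t :: rest =>
    if q then mer2 (q != parq t) (w ++ ',' :: stripq t) rest
    else w :: mer2 (parq t) (stripq t) rest

def merHead (q : Bool) (w : List Char) (fs : List (List Char)) : List (List Char) :=
  match fs with
  | [] => [w]
  | h :: rest => mer2 (q != parq h) (w ++ stripq h) rest

theorem splitc_ne_nil (l : List Char) : splitc l ≠ [] := by
  cases l with
  | nil => simp [splitc]
  | cons a s =>
    simp only [splitc]
    split
    · simp
    · cases h : splitc s <;> simp

theorem mod_two_succ_bne (n : Nat) : ((n + 1) % 2 == 1) = !(n % 2 == 1) := by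
  rcases Nat.mod_two_eq_zero_or_one n with h | h <;> simp [Nat.add_mod, h]

theorem parq_nil : parq [] = false := rfl

theorem parq_cons_quote (h : List Char) : parq ('"' :: h) = !parq h := by
  simp [parq, mod_two_succ_bne]

theorem parq_cons_ne (a : Char) (h : List Char) (ha : a ≠ '"') : parq (a :: h) = parq h := by
  simp [parq, ha]

theorem stripq_cons_quote (h : List Char) : stripq ('"' :: h) = stripq h := by
  simp [stripq]

theorem stripq_cons_ne (a : Char) (h : List Char) (ha : a ≠ '"') :
    stripq (a :: h) = a :: stripq h := by
  simp [stripq, ha]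

theorem stripq_append (x y : List Char) : stripq (x ++ y) = stripq x ++ stripq y := by
  simp [stripq]

theorem count_go_quote (l : List Char) : ∀ (fuel acc : Nat), l.length ≤ fuel →
    PySem.Chars.count.go ['"'] fuel l acc = acc + l.count '"' := by
  induction l with
  | nil =>
    intro fuel acc _
    cases fuel <;> simp [PySem.Chars.count.go]
  | cons a rest ih =>
    intro fuel acc hf
    cases fuel with
    | zero => simp at hf
    | succ f =>
      simp only [PySem.Chars.count.go, List.isPrefixOf]
      simp only [List.length_cons, List.length_nil, List.drop_succ_cons, List.drop_zero]
      by_cases ha : a = '"'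
      · subst ha
        rw [if_pos (by simp)]
        rw [ih f (acc + 1) (by simpa using Nat.lt_succ_iff.mp (by simpa using hf))]
        simp
        omega
      · rw [if_neg (by simp [Ne.symm ha])]
        rw [ih f acc (by simpa using Nat.lt_succ_iff.mp (by simpa using hf))]
        simp [ha]

theorem count_quote (l : List Char) : PySem.Chars.count l ['"'] = l.count '"' := by
  simp [PySem.Chars.count, count_go_quote l l.length 0 (le_refl _)]

theorem replace_go_quote (l : List Char) : ∀ (fuel : Nat) (acc : List Char), l.length ≤ fuel →
    PySem.Chars.replace.go ['"'] [] fuel l acc = acc.reverse ++ stripq l := by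
  induction l with
  | nil =>
    intro fuel acc _
    cases fuel <;> simp [PySem.Chars.replace.go, stripq]
  | cons a rest ih =>
    intro fuel acc hf
    cases fuel with
    | zero => simp at hf
    | succ f =>
      simp only [PySem.Chars.replace.go, List.isPrefixOf]
      simp only [List.length_cons, List.length_nil, List.drop_succ_cons, List.drop_zero]
      by_cases ha : a = '"'
      · subst ha
        rw [if_pos (by simp)]
        simp only [List.reverse_nil, List.nil_append]
        rw [ih f acc (by simpa using Nat.lt_succ_iff.mp (by simpa using hf))]
        simp [stripq_cons_quote]
      · rw [if_neg (by simp [Ne.symm ha])]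
        rw [ih f (a :: acc) (by simpa using Nat.lt_succ_iff.mp (by simpa using hf))]
        simp [stripq_cons_ne a rest ha]

theorem replace_quote (l : List Char) : PySem.Chars.replace l ['"'] [] = stripq l := by
  simp [PySem.Chars.replace, replace_go_quote l l.length [] (le_refl _)]

theorem splitOn_go_comma (l : List Char) : ∀ (fuel : Nat) (cur : List Char)
    (acc : List (List Char)), l.length ≤ fuel →
    PySem.Chars.splitOn.go [','] fuel l cur acc = acc.reverse ++ consHead cur.reverse (splitc l) := by
  induction l with
  | nil =>
    intro fuel cur acc _
    cases fuel <;> simp [PySem.Chars.splitOn.go, splitc, consHead]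
  | cons a rest ih =>
    intro fuel cur acc hf
    cases fuel with
    | zero => simp at hf
    | succ f =>
      simp only [PySem.Chars.splitOn.go, List.isPrefixOf]
      simp only [List.length_cons, List.length_nil, List.drop_succ_cons, List.drop_zero]
      by_cases ha : a = ','
      · subst ha
        rw [if_pos (by simp)]
        rw [ih f [] (cur.reverse :: acc) (by simpa using Nat.lt_succ_iff.mp (by simpa using hf))]
        cases h : splitc rest with
        | nil => exact absurd h (splitc_ne_nil rest)
        | cons hh tt => simp [splitc, consHead, h]
      · rw [if_neg (by simp [Ne.symm ha])]
        rw [ih f (a :: cur) acc (by simpa using Nat.lt_succ_iff.mp (by simpa using hf))]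
        simp only [splitc, if_neg ha]
        cases h : splitc rest with
        | nil => exact absurd h (splitc_ne_nil rest)
        | cons hh tt => simp [consHead]

theorem splitOn_comma (l : List Char) : PySem.Chars.splitOn l [','] = splitc l := by
  rw [PySem.Chars.splitOn, splitOn_go_comma l (l.length + 1) [] [] (by omega)]
  cases h : splitc l with
  | nil => exact absurd h (splitc_ne_nil l)
  | cons hh tt => simp [consHead]

-- A's inner fold, characterised by splitc / mer2
theorem A_fold (s : List Char) : ∀ (q : Bool) (ws : List (List Char)) (w : List Char),
    ((s.foldl pvStepA (q, ws, w)).2.1 ++ [(s.foldl pvStepA (q, ws, w)).2.2]) =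
      ws ++ merHead q w (splitc s) := by
  induction s with
  | nil => intro q ws w; simp [splitc, merHead, mer2, stripq]
  | cons a s ih =>
    intro q ws w
    simp only [List.foldl_cons]
    by_cases ha : a = '"'
    · subst ha
      have hstep : pvStepA (q, ws, w) '"' = (!q, ws, w) := by simp [pvStepA]
      rw [hstep, ih]
      cases h : splitc s with
      | nil => exact absurd h (splitc_ne_nil s)
      | cons hh tt =>
        simp only [splitc, if_neg (by decide : ¬('"' = ',')), h, merHead,
          parq_cons_quote, stripq_cons_quote]
        congr 1
        cases q <;> cases (parq hh) <;> rfl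
    · by_cases hc : a = ','
      · subst hc
        cases hq : q with
        | true =>
          have hstep : pvStepA (true, ws, w) ',' = (true, ws, w ++ [',']) := by
            simp [pvStepA]
          rw [hstep, ih]
          cases h : splitc s with
          | nil => exact absurd h (splitc_ne_nil s)
          | cons hh tt =>
            simp [splitc, h, merHead, parq_nil, stripq, mer2, List.append_assoc]
        | false =>
          have hstep : pvStepA (false, ws, w) ',' = (false, ws ++ [w], []) := by
            simp [pvStepA]
          rw [hstep, ih]
          cases h : splitc s with
          | nil => exact absurd h (splitc_ne_nil s)
          | cons hh tt =>
            simp [splitc, h, merHead, parq_nil, stripq, mer2, List.append_assoc]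
      · have hstep : pvStepA (q, ws, w) a = (q, ws, w ++ [a]) := by
          simp [pvStepA, ha, hc]
        rw [hstep, ih]
        cases h : splitc s with
        | nil => exact absurd h (splitc_ne_nil s)
        | cons hh tt =>
          simp only [splitc, if_neg hc, h, merHead, parq_cons_ne a hh ha,
            stripq_cons_ne a hh ha, List.append_assoc, List.singleton_append]

theorem bool_flip_bne (p q : Bool) : (if p then !q else q) = (q != p) := by cases p <;> cases q <;> rfl

-- B's token fold, characterised by mer2
theorem B_fold (rest : List (List Char)) :
    ∀ (merged : List (List Char)) (buf : List Char) (q : Bool),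
    ((rest.foldl pvStepB (merged, buf, q)).1 ++
      [(rest.foldl pvStepB (merged, buf, q)).2.1]).map stripq =
    merged.map stripq ++ mer2 q (stripq buf) rest := by
  induction rest with
  | nil => intro merged buf q; simp [mer2]
  | cons t rest ih =>
    intro merged buf q
    simp only [List.foldl_cons]
    cases hq : q with
    | true =>
      have hstep : pvStepB (merged, buf, true) t =
          (merged, buf ++ ',' :: t, if parq t then !true else true) := by
        simp only [pvStepB, count_quote]
        by_cases hp : parq t
        · simp_all [parq]
        · simp_all [parq]
      rw [hstep, ih]
      rw [bool_flip_bne]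
      simp [mer2, stripq_append, stripq_cons_ne ',' t (by decide)]
    | false =>
      have hstep : pvStepB (merged, buf, false) t =
          (merged ++ [buf], t, if parq t then !false else false) := by
        simp only [pvStepB, count_quote]
        by_cases hp : parq t
        · simp_all [parq]
        · simp_all [parq]
      rw [hstep, ih]
      rw [bool_flip_bne]
      simp [mer2]

theorem line_eq (line : String) :
    (let r := line.toList.foldl pvStepA (false, [], [])
     (r.2.1 ++ [r.2.2]).map String.ofList) =
    (let fields := PySem.Chars.splitOn line.toList [',']
     let f0 := fields.headD []
     let st := (fields.drop 1).foldl pvStepB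
       ([], f0, PySem.Chars.count f0 ['"'] % 2 == 1)
     (st.1 ++ [st.2.1]).map (fun f => String.ofList (PySem.Chars.replace f ['"'] []))) := by
  simp only [splitOn_comma, count_quote]
  cases h : splitc line.toList with
  | nil => exact absurd h (splitc_ne_nil line.toList)
  | cons f0 tail =>
    simp only [List.headD_cons, List.drop_one, List.tail_cons]
    have hB := B_fold tail [] f0 (f0.count '"' % 2 == 1)
    have hA := A_fold line.toList false [] []
    rw [h] at hA
    simp only [merHead, List.nil_append] at hA
    have : (f0.count '"' % 2 == 1) = parq f0 := rfl
    rw [this] at hB ⊢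
    have hff : (false != parq f0) = parq f0 := by cases parq f0 <;> rfl
    rw [hff] at hA
    have hmapB : ∀ xs : List (List Char),
        xs.map (fun f => String.ofList (PySem.Chars.replace f ['"'] [])) =
        (xs.map stripq).map String.ofList := by
      intro xs; simp [replace_quote, List.map_map, Function.comp]
    rw [hmapB]
    rw [hB]
    simp only [List.map_nil, List.nil_append]
    rw [hA]

-- ===== VERDICT (by name: the statement is the Claim_ definition above) =====
theorem parseVaersCSVFileLines_spec : Claim_equal_parseVaersCSVFileLines := by
  intro lines _
  unfold Spec_parseVaersCSVFileLines parseVaersCSVFileLines parseVaersCSVFileLines_alt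
  exact List.map_congr_left (fun line _ => line_eq line)
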